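-- pv_equiv track=rewrite | github.com/Canadian-Light-Source/pyStxm | bcm/devices/zmq/pixelator/scanLineData_monitor.py | gen_tiled_map
-- ===== SOURCE A (Python) =====
-- def gen_tiled_map(image_width, image_height, block_width, block_height):
--     block_coordinates = {}
--     block_num = 0
--
--     # Loop through the grid, block by block
--     for y in range(0, image_height, block_height):
--         for x in range(0, image_width, block_width):
--             # For each block, record the starting x, y coordinates
--             block_coordinates[block_num] = (y, x)
--             block_num += 1
--
--     return block_coordinates
-- ===== SOURCE B (Python) =====
-- def gen_tiled_map(image_width, image_height, block_width, block_height):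
--     # Closed-form index -> coordinate mapping: one flat pass with divmod
--     # instead of nested loops with a running counter.
--     nrows = len(range(0, image_height, block_height))
--     if nrows == 0:
--         return {}
--     ncols = len(range(0, image_width, block_width))
--     return {n: ((n // ncols) * block_height, (n % ncols) * block_width)
--             for n in range(nrows * ncols)}
-- ===== Notes on version B (the rewrite author's own statement) =====
-- stated objective: alternative
-- what changed: Replaces the nested y/x loops with a running counter by a single flat pass over range(nrows*ncols) that derives each block's (row, col) via divmod and multiplies back to coordinates; the grid dimensions are taken as len(range(...)) so the ValueError on a zero step is preserved.
import Mathlib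
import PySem

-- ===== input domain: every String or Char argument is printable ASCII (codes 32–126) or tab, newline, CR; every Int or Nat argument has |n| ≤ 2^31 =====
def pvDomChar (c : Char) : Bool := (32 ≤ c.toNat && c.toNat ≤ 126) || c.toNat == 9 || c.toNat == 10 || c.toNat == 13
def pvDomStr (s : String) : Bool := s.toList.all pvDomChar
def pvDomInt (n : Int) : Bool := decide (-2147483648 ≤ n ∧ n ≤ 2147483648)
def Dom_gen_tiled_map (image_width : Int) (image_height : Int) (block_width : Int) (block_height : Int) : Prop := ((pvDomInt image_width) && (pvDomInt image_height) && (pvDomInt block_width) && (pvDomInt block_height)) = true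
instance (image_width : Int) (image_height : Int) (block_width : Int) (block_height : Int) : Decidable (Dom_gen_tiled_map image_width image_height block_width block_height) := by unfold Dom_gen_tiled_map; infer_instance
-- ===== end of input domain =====

-- B replaces A's nested row/column loops with a counter by one flat pass over
-- range(nrows*ncols), deriving each block's coordinates from the index via divmod
-- (alternative decomposition; same asymptotic cost).


-- ===== PORT A =====
-- dict keys are the fresh counter values 0,1,2,…, so each assignment appends a
-- new (key, value) pair; the dict is the association list built by appending.
def gen_tiled_map (image_width : Int) (image_height : Int) (block_width : Int) (block_height : Int) : List (Int × Int × Int) :=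
  ((PySem.List.pyRange 0 image_height block_height).foldl
    (fun (st : List (Int × Int × Int) × Int) y =>
      (PySem.List.pyRange 0 image_width block_width).foldl
        (fun st x => (st.1 ++ [(st.2, y, x)], st.2 + 1)) st)
    ([], 0)).1

-- ===== PORT B =====
def gen_tiled_map_alt (image_width : Int) (image_height : Int) (block_width : Int) (block_height : Int) : List (Int × Int × Int) :=
  let nrows : Int := ((PySem.List.pyRange 0 image_height block_height).length : Int)
  if nrows = 0 then []
  else
    let ncols : Int := ((PySem.List.pyRange 0 image_width block_width).length : Int)
    (PySem.List.pyRange 0 (nrows * ncols) 1).map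
      (fun n => (n, PySem.Int.floordiv n ncols * block_height,
                    PySem.Int.mod n ncols * block_width))

-- ===== PRECONDITION & SPEC =====
-- Pre_ excludes exactly the inputs where Python A raises ValueError from range()
-- with step 0: block_height = 0, or block_width = 0 while the outer row range is
-- non-empty (B raises the same ValueError there).
def Pre_gen_tiled_map (image_width : Int) (image_height : Int) (block_width : Int) (block_height : Int) : Prop :=
  block_height ≠ 0 ∧
  (((0 < block_height ∧ 0 < image_height) ∨ (block_height < 0 ∧ image_height < 0)) → block_width ≠ 0)
instance (image_width : Int) (image_height : Int) (block_width : Int) (block_height : Int) : Decidable (Pre_gen_tiled_map image_width image_height block_width block_height) := by unfold Pre_gen_tiled_map; infer_instance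

def pvWitness_gen_tiled_map : Int × Int × Int × Int := (6, 4, 3, 2)

def Spec_gen_tiled_map (image_width : Int) (image_height : Int) (block_width : Int) (block_height : Int) (out : List (Int × Int × Int)) : Prop := out = gen_tiled_map_alt image_width image_height block_width block_height
instance (image_width : Int) (image_height : Int) (block_width : Int) (block_height : Int) (out : List (Int × Int × Int)) : Decidable (Spec_gen_tiled_map image_width image_height block_width block_height out) := by unfold Spec_gen_tiled_map; infer_instance

-- ===== CLAIM (what is proved, stated in full; the proofs are below) =====
def Claim_equal_gen_tiled_map : Prop := ∀ (image_width : Int) (image_height : Int) (block_width : Int) (block_height : Int), Dom_gen_tiled_map image_width image_height block_width block_height → Pre_gen_tiled_map image_width image_height block_width block_height → Spec_gen_tiled_map image_width image_height block_width block_height (gen_tiled_map image_width image_height block_width block_height)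

-- ===== LEMMAS AND PROOFS =====

-- pyRange is a map over List.range of its own length (any step, incl. 0).
lemma pyRange_eq_map_length (a b s : Int) :
    PySem.List.pyRange a b s
      = (List.range (PySem.List.pyRange a b s).length).map (fun (k : Nat) => a + s * (k : Int)) := by
  unfold PySem.List.pyRange
  split_ifs <;> simp

-- inner loop: folding over one row's x-range appends nc records and advances the counter by nc
lemma inner_foldl (bw y : Int) (nc : Nat) (acc : List (Int × Int × Int)) (c : Int) :
    ((List.range nc).map (fun (j : Nat) => 0 + bw * (j : Int))).foldl
        (fun (st : List (Int × Int × Int) × Int) x => (st.1 ++ [(st.2, y, x)], st.2 + 1)) (acc, c)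
      = (acc ++ (List.range nc).map (fun (j : Nat) => (c + (j : Int), y, bw * (j : Int))), c + nc) := by
  induction nc generalizing acc c with
  | zero => simp
  | succ n ih =>
      rw [List.range_succ]
      simp only [List.map_append, List.foldl_append, ih, List.map_cons, List.map_nil,
        List.foldl_cons, List.foldl_nil]
      refine Prod.ext ?_ ?_
      · simp
      · push_cast; ring

-- outer loop: folding over the y-range flattens the grid row by row
lemma outer_foldl (bw bh iw : Int) (nc : Nat)
    (hC : PySem.List.pyRange 0 iw bw = (List.range nc).map (fun (j : Nat) => 0 + bw * (j : Int)))
    (nr : Nat) (acc : List (Int × Int × Int)) (c : Int) :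
    ((List.range nr).map (fun (i : Nat) => 0 + bh * (i : Int))).foldl
        (fun (st : List (Int × Int × Int) × Int) y =>
          (PySem.List.pyRange 0 iw bw).foldl
            (fun st x => (st.1 ++ [(st.2, y, x)], st.2 + 1)) st) (acc, c)
      = (acc ++ (List.range nr).flatMap
            (fun (i : Nat) => (List.range nc).map
              (fun (j : Nat) => (c + (i : Int) * nc + (j : Int), 0 + bh * (i : Int), bw * (j : Int)))),
         c + nr * nc) := by
  induction nr generalizing acc c with
  | zero => simp
  | succ n ih =>
      rw [List.range_succ]
      simp only [List.map_append, List.foldl_append, List.map_cons, List.map_nil,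
        List.foldl_cons, List.foldl_nil]
      rw [ih, hC, inner_foldl]
      simp only [List.flatMap_append, List.flatMap_cons, List.flatMap_nil,
        List.append_nil, List.append_assoc]
      refine Prod.ext ?_ ?_
      · rfl
      · push_cast; ring

-- the flat pass over range (nr*nc) is the flattened grid
lemma range_mul_map {α : Type} (g : Nat → α) (nc nr : Nat) :
    (List.range (nr * nc)).map g
      = (List.range nr).flatMap (fun i => (List.range nc).map (fun j => g (i * nc + j))) := by
  induction nr with
  | zero => simp
  | succ n ih =>
      rw [Nat.succ_mul, List.range_add, List.map_append, ih, List.range_succ,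
        List.flatMap_append]
      simp [Function.comp]

-- divmod recovers the row/column indices
lemma divmod_recover (i j nc : Nat) (hj : j < nc) :
    PySem.Int.floordiv ((i * nc + j : Nat) : Int) (nc : Int) = (i : Int) ∧
    PySem.Int.mod ((i * nc + j : Nat) : Int) (nc : Int) = (j : Int) := by
  have h1 : 0 < nc := Nat.lt_of_le_of_lt (Nat.zero_le j) hj
  have hnc : (0 : Int) < (nc : Int) := by exact_mod_cast h1
  rw [PySem.Int.floordiv_eq_ediv_of_pos hnc, PySem.Int.mod_eq_emod_of_pos hnc]
  push_cast
  constructor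
  · rw [add_comm, mul_comm, Int.add_mul_ediv_left _ _ (by omega : (nc : Int) ≠ 0),
      Int.ediv_eq_zero_of_lt (by positivity) (by exact_mod_cast hj)]
    ring
  · rw [add_comm, mul_comm, Int.add_mul_emod_self_left]
    exact Int.emod_eq_of_lt (by positivity) (by exact_mod_cast hj)

-- ===== VERDICT (by name: the statement is the Claim_ definition above) =====
theorem gen_tiled_map_spec : Claim_equal_gen_tiled_map := by
  intro iw ih bw bh _ hpre
  unfold Spec_gen_tiled_map gen_tiled_map
  simp only [gen_tiled_map_alt]
  set nr := (PySem.List.pyRange 0 ih bh).length with hnr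
  set nc := (PySem.List.pyRange 0 iw bw).length with hnc
  by_cases h0 : nr = 0
  · -- empty row range: both sides are []
    have hR : PySem.List.pyRange 0 ih bh = [] := List.eq_nil_of_length_eq_zero h0
    simp [hR, h0]
  · have hnz : ((nr : Int)) ≠ 0 := by exact_mod_cast h0
    rw [if_neg hnz]
    have hR := pyRange_eq_map_length 0 ih bh
    have hC := pyRange_eq_map_length 0 iw bw
    rw [hR, outer_foldl bw bh iw nc hC nr [] 0, List.nil_append]
    have hlen : (((nr : Int)) * (nc : Int) - 0).toNat = nr * nc := by
      omega
    rw [PySem.List.pyRange_one, hlen, List.map_map, range_mul_map]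
    apply List.flatMap_congr
    intro i _
    apply List.map_congr_left
    intro j hj
    have hj' : j < nc := List.mem_range.mp hj
    obtain ⟨hd, hm⟩ := divmod_recover i j nc hj'
    simp only [Function.comp]
    rw [show (0:Int) + ((i*nc+j : Nat) : Int) = ((i*nc+j : Nat) : Int) by ring, hd, hm]
    refine Prod.ext ?_ (Prod.ext ?_ ?_) <;> (try push_cast) <;> ring
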